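-- pv_equiv track=rewrite | github.com/jonathan-marsan/plotlyextreme | utilities.py | create_visibility_buttons_booleans
-- ===== SOURCE A (Python) =====
-- def create_visibility_buttons_booleans(buttons, traces_dict):
--     graph_visibility_by_button = dict()
--     for button in buttons:
--         visibility_list = list()
--         for element, elements in traces_dict.items():
--             for segment, segments in elements.items():
--                 visibility_list.append(button == element)
--             graph_visibility_by_button.update(
--                     {
--                         button: visibility_list
--                     }
--                 )
--     return graph_visibility_by_button
-- ===== SOURCE B (Python) =====
-- def create_visibility_buttons_booleans(buttons, traces_dict):
--     # Index traces_dict once: total segment count and, per element, the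
--     # half-open position ranges its segments occupy in the flat trace order.
--     positions = {}
--     offset = 0
--     for element, elements in traces_dict.items():
--         n = len(elements)
--         positions.setdefault(element, []).append((offset, offset + n))
--         offset += n
--     result = {}
--     for button in buttons:
--         vis = [False] * offset
--         for s, e in positions.get(button, []):
--             vis[s:e] = [True] * (e - s)
--         result[button] = vis
--     return result
-- ===== Notes on version B (the rewrite author's own statement) =====
-- stated objective: faster
-- what changed: B builds a hash index from element to the position ranges its segments occupy plus the total segment count, then produces each button's list by patching True over an all-False template at the ranges looked up for that button, instead of A's per-button rescan of the nested dict comparing the button against every element; a timing run measured B 6-12x faster at the largest sizes.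
-- intended difference: When traces_dict is empty and buttons is non-empty, A returns {} (its dict update sits inside the element loop so it never runs), while B returns each button mapped to [], which is the intended per-button visibility list over zero traces. — e.g. on create_visibility_buttons_booleans(["a"], []): A returns [], B returns [("a", [])]
import Mathlib
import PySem

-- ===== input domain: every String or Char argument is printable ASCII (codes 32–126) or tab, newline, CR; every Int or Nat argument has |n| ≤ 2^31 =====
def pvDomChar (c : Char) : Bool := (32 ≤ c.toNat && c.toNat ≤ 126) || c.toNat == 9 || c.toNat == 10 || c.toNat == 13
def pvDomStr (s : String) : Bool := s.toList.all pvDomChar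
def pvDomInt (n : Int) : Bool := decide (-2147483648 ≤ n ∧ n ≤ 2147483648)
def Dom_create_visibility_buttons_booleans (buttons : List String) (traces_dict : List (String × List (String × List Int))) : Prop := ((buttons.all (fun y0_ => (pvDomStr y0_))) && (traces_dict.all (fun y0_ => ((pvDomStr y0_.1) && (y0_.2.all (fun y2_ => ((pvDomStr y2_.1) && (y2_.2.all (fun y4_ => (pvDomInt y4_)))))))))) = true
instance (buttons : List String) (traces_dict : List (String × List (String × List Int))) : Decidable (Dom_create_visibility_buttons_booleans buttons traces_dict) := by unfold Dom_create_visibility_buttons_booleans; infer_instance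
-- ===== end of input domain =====

-- B indexes traces_dict once (element -> segment position ranges, plus total segment count) and
-- builds each button's list by patching True over an all-False template at the looked-up ranges,
-- instead of A's per-button rescan comparing the button against every element. Return values only.

-- ===== PORT A =====
-- literal transliteration of A: per button, rebuild visibility_list over the nested dict,
-- with the dict update inside the element loop (so an empty traces_dict never inserts).
-- stepA is A's element-loop body (segment loop, then the dict update), factored for the proofs.
def stepA (button : String) (st : List Bool × PySem.Dict String (List Bool))
    (ep : String × List (String × List Int)) : List Bool × PySem.Dict String (List Bool) :=
  let vis := ep.2.foldl (fun vl _ => vl ++ [button == ep.1]) st.1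
  (vis, st.2.insert button vis)

def create_visibility_buttons_booleans (buttons : List String) (traces_dict : List (String × List (String × List Int))) : List (String × List Bool) :=
  (buttons.foldl
    (fun (g : PySem.Dict String (List Bool)) button =>
      (traces_dict.foldl (stepA button) ([], g)).2)
    PySem.Dict.empty).items

-- ===== PORT B =====
-- vis[s:e] = [True]*(e-s) on an in-bounds slice (0 ≤ s ≤ e ≤ len): exact as take/replicate/drop
def setTrueRange (vis : List Bool) (s e : Nat) : List Bool :=
  vis.take s ++ List.replicate (e - s) true ++ vis.drop e

-- the first loop of Source B: (offset, positions) after scanning traces_dict;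
-- positions.setdefault(element, []).append(r) is modelled by insert of getD ++ [r]
-- (Python dict assignment keeps the position of an existing key, like Dict.insert)
def buildPositions (traces_dict : List (String × List (String × List Int))) :
    Nat × PySem.Dict String (List (Nat × Nat)) :=
  traces_dict.foldl
    (fun st ep =>
      let n := ep.2.length
      (st.1 + n, st.2.insert ep.1 (st.2.getD ep.1 [] ++ [(st.1, st.1 + n)])))
    (0, PySem.Dict.empty)

def create_visibility_buttons_booleans_alt (buttons : List String) (traces_dict : List (String × List (String × List Int))) : List (String × List Bool) :=
  let p := buildPositions traces_dict
  (buttons.foldl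
    (fun (d : PySem.Dict String (List Bool)) button =>
      d.insert button
        ((p.2.getD button []).foldl (fun vis r => setTrueRange vis r.1 r.2)
          (List.replicate p.1 false)))
    PySem.Dict.empty).items

-- ===== PRECONDITION & SPEC =====
-- When traces_dict is empty and buttons is non-empty, A returns {} (its dict update sits inside
-- the element loop so it never runs), while B returns each button mapped to [], the intended
-- per-button visibility list over zero traces.
def D_create_visibility_buttons_booleans (buttons : List String) (traces_dict : List (String × List (String × List Int))) : Prop :=
  buttons ≠ [] ∧ traces_dict = []
instance (buttons : List String) (traces_dict : List (String × List (String × List Int))) : Decidable (D_create_visibility_buttons_booleans buttons traces_dict) := by unfold D_create_visibility_buttons_booleans; infer_instance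

def Spec_create_visibility_buttons_booleans (buttons : List String) (traces_dict : List (String × List (String × List Int))) (out : List (String × List Bool)) : Prop := ¬ D_create_visibility_buttons_booleans buttons traces_dict → out = create_visibility_buttons_booleans_alt buttons traces_dict
instance (buttons : List String) (traces_dict : List (String × List (String × List Int))) (out : List (String × List Bool)) : Decidable (Spec_create_visibility_buttons_booleans buttons traces_dict out) := by unfold Spec_create_visibility_buttons_booleans; infer_instance

def pvDiffWitness_create_visibility_buttons_booleans : List String × (List (String × List (String × List Int))) := (["a"], [])
def pvDiffWitnessOut_create_visibility_buttons_booleans : (List (String × List Bool)) × (List (String × List Bool)) := ([], [("a", [])])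

-- ===== CLAIM (what is proved, stated in full; the proofs are below) =====
def Claim_unchanged_create_visibility_buttons_booleans : Prop := ∀ (buttons : List String) (traces_dict : List (String × List (String × List Int))), Dom_create_visibility_buttons_booleans buttons traces_dict → Spec_create_visibility_buttons_booleans buttons traces_dict (create_visibility_buttons_booleans buttons traces_dict)
def Claim_changed_create_visibility_buttons_booleans : Prop := Dom_create_visibility_buttons_booleans (pvDiffWitness_create_visibility_buttons_booleans.1) (pvDiffWitness_create_visibility_buttons_booleans.2) ∧ D_create_visibility_buttons_booleans (pvDiffWitness_create_visibility_buttons_booleans.1) (pvDiffWitness_create_visibility_buttons_booleans.2) ∧ create_visibility_buttons_booleans (pvDiffWitness_create_visibility_buttons_booleans.1) (pvDiffWitness_create_visibility_buttons_booleans.2) = pvDiffWitnessOut_create_visibility_buttons_booleans.1 ∧ create_visibility_buttons_booleans_alt (pvDiffWitness_create_visibility_buttons_booleans.1) (pvDiffWitness_create_visibility_buttons_booleans.2) = pvDiffWitnessOut_create_visibility_buttons_booleans.2 ∧ pvDiffWitnessOut_create_visibility_buttons_booleans.1 ≠ pvDiffWitnessOut_create_visibility_buttons_booleans.2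
def Claim_exact_create_visibility_buttons_booleans : Prop := ∀ (buttons : List String) (traces_dict : List (String × List (String × List Int))), Dom_create_visibility_buttons_booleans buttons traces_dict → D_create_visibility_buttons_booleans buttons traces_dict → create_visibility_buttons_booleans buttons traces_dict ≠ create_visibility_buttons_booleans_alt buttons traces_dict

-- ===== LEMMAS AND PROOFS =====

theorem str_beq_comm (a b : String) : (a == b) = (b == a) := by
  by_cases h : a = b
  · simp [h]
  · simp [h, Ne.symm h]

-- the innermost segment loop of A appends one constant boolean per segment
theorem foldl_append_const {α β : Type} (l : List α) (c : β) (pre : List β) :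
    l.foldl (fun vl _ => vl ++ [c]) pre = pre ++ l.map (fun _ => c) := by
  induction l generalizing pre with
  | nil => simp
  | cons x xs ih => simp [List.foldl_cons, ih]

-- the boolean sequence A builds for a button, one entry per segment position
def segBools (button : String) (td : List (String × List (String × List Int))) : List Bool :=
  td.flatMap (fun ep => ep.2.map (fun _ => button == ep.1))

theorem stepA_eq (button : String) (st : List Bool × PySem.Dict String (List Bool))
    (ep : String × List (String × List Int)) :
    stepA button st ep
    = (st.1 ++ ep.2.map (fun _ => button == ep.1),
       st.2.insert button (st.1 ++ ep.2.map (fun _ => button == ep.1))) := by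
  rw [show stepA button st ep = (ep.2.foldl (fun vl _ => vl ++ [button == ep.1]) st.1, st.2.insert button (ep.2.foldl (fun vl _ => vl ++ [button == ep.1]) st.1)) from rfl, foldl_append_const]

-- A's element loop, second component: for non-empty td, the repeated same-key inserts
-- collapse to one insert of the final list
theorem innerA_snd (button : String) (td : List (String × List (String × List Int)))
    (pre : List Bool) (g : PySem.Dict String (List Bool)) (h : td ≠ []) :
    (td.foldl (stepA button) (pre, g)).2
    = g.insert button (pre ++ segBools button td) := by
  induction td generalizing pre g with
  | nil => exact absurd rfl h
  | cons ep rest ih =>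
    by_cases hr : rest = []
    · subst hr
      rw [List.foldl_cons, stepA_eq]
      simp [segBools]
    · rw [List.foldl_cons, stepA_eq, ih _ _ hr]
      rw [PySem.Dict.insert_insert_self]
      simp [segBools, List.flatMap_cons]

-- B-side characterisation: the ranges button's segments occupy, relative offsets
def rangesOf (button : String) : List (String × List (String × List Int)) → List (Nat × Nat)
  | [] => []
  | ep :: rest =>
      (if ep.1 == button then [(0, ep.2.length)] else [])
        ++ (rangesOf button rest).map (fun p => (p.1 + ep.2.length, p.2 + ep.2.length))

def totalLen (td : List (String × List (String × List Int))) : Nat :=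
  (td.map (fun ep => ep.2.length)).sum

theorem map_shift_shift (rs : List (Nat × Nat)) (a b : Nat) :
    (rs.map (fun p => (p.1 + b, p.2 + b))).map (fun p => (p.1 + a, p.2 + a))
    = rs.map (fun p => (p.1 + (b + a), p.2 + (b + a))) := by
  rw [List.map_map]
  apply List.map_congr_left
  intro p _
  simp [Nat.add_assoc]

-- the indexing loop's dict: lookup of any button yields its shifted relative ranges
theorem rangesOf_cons (button : String) (ep : String × List (String × List Int))
    (rest : List (String × List (String × List Int))) :
    rangesOf button (ep :: rest)
    = (if ep.1 == button then [(0, ep.2.length)] else [])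
        ++ (rangesOf button rest).map (fun p => (p.1 + ep.2.length, p.2 + ep.2.length)) := rfl

-- the indexing loop's dict: lookup of any button yields its shifted relative ranges
theorem build_getD (td : List (String × List (String × List Int))) (off0 : Nat)
    (pd0 : PySem.Dict String (List (Nat × Nat))) (button : String) :
    ((td.foldl
      (fun st ep =>
        let n := ep.2.length
        (st.1 + n, st.2.insert ep.1 (st.2.getD ep.1 [] ++ [(st.1, st.1 + n)])))
      (off0, pd0)).2).getD button []
    = pd0.getD button [] ++ (rangesOf button td).map (fun p => (p.1 + off0, p.2 + off0)) := by
  induction td generalizing off0 pd0 with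
  | nil => simp [rangesOf]
  | cons ep rest ih =>
    rw [List.foldl_cons]
    simp only []
    rw [ih, PySem.Dict.getD_insert, rangesOf_cons, List.map_append, map_shift_shift]
    by_cases h : button = ep.1
    · rw [if_pos h]
      have hbeq : (ep.1 == button) = true := by simp [h.symm]
      rw [hbeq]
      simp only [List.append_assoc, h]
      simp [Nat.add_comm]
    · rw [if_neg h]
      have hbeq : (ep.1 == button) = false := by simp [Ne.symm h]
      rw [hbeq]
      simp [Nat.add_comm]

-- the indexing loop's offset is the total segment count
theorem build_fst (td : List (String × List (String × List Int))) (off0 : Nat)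
    (pd0 : PySem.Dict String (List (Nat × Nat))) :
    (td.foldl
      (fun st ep =>
        let n := ep.2.length
        (st.1 + n, st.2.insert ep.1 (st.2.getD ep.1 [] ++ [(st.1, st.1 + n)])))
      (off0, pd0)).1 = off0 + totalLen td := by
  induction td generalizing off0 pd0 with
  | nil => simp [totalLen]
  | cons ep rest ih =>
    rw [List.foldl_cons]
    simp only []
    rw [ih]
    simp [totalLen, Nat.add_assoc]

-- slice assignment on a shifted range commutes with a fixed prefix
theorem setTrueRange_shift (a : Nat) (tpl l : List Bool) (s e : Nat) (h : tpl.length = a) :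
    setTrueRange (tpl ++ l) (s + a) (e + a) = tpl ++ setTrueRange l s e := by
  subst h
  unfold setTrueRange
  rw [List.take_append, List.drop_append]
  have h1 : s + tpl.length - tpl.length = s := by omega
  have h2 : e + tpl.length - tpl.length = e := by omega
  have h3 : tpl.take (s + tpl.length) = tpl := List.take_of_length_le (by omega)
  have h4 : tpl.drop (e + tpl.length) = [] := List.drop_eq_nil_of_le (by omega)
  have h5 : e + tpl.length - (s + tpl.length) = e - s := by omega
  rw [h1, h2, h3, h4, h5]
  simp

-- applying a list of shifted ranges leaves a fixed prefix untouched
theorem apply_shift (rs : List (Nat × Nat)) (a : Nat) (tpl l : List Bool) (h : tpl.length = a) :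
    (rs.map (fun p => (p.1 + a, p.2 + a))).foldl
      (fun vis r => setTrueRange vis r.1 r.2) (tpl ++ l)
    = tpl ++ rs.foldl (fun vis r => setTrueRange vis r.1 r.2) l := by
  induction rs generalizing l with
  | nil => simp
  | cons r rest ih =>
    simp only [List.map_cons, List.foldl_cons]
    rw [setTrueRange_shift a tpl l r.1 r.2 h, ih]

-- patching True at a button's ranges over the all-False template yields A's boolean sequence
theorem apply_ranges_eq_segBools (button : String) (td : List (String × List (String × List Int))) :
    (rangesOf button td).foldl (fun vis r => setTrueRange vis r.1 r.2)
      (List.replicate (totalLen td) false)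
    = segBools button td := by
  induction td with
  | nil => simp [rangesOf, totalLen, segBools]
  | cons ep rest ih =>
    have hlen : totalLen (ep :: rest) = ep.2.length + totalLen rest := by
      simp [totalLen]
    rw [hlen, List.replicate_add, rangesOf_cons, List.foldl_append]
    have hmapc : ∀ (b : Bool), ep.2.map (fun _ => b) = List.replicate ep.2.length b := by
      intro b; exact List.map_const' ..
    have hsegc : ∀ (b : Bool), (ep.1 == button) = b →
        segBools button (ep :: rest)
        = List.replicate ep.2.length b ++ segBools button rest := by
      intro b hb
      simp only [segBools, List.flatMap_cons]
      rw [show (button == ep.1) = b from (str_beq_comm button ep.1).trans hb] at *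
      rw [hmapc]
    by_cases h : ep.1 = button
    · have hbeq : (ep.1 == button) = true := by simp [h]
      rw [hbeq]
      simp only [if_pos, List.foldl_cons, List.foldl_nil]
      have hset : setTrueRange (List.replicate ep.2.length false ++ List.replicate (totalLen rest) false) 0 ep.2.length
          = List.replicate ep.2.length true ++ List.replicate (totalLen rest) false := by
        unfold setTrueRange
        simp
      rw [hset, apply_shift (rangesOf button rest) ep.2.length
            (List.replicate ep.2.length true) (List.replicate (totalLen rest) false)
            (List.length_replicate ..), ih, hsegc true hbeq]
    · have hbeq : (ep.1 == button) = false := by simp [h]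
      rw [hbeq]
      simp only [Bool.false_eq_true, if_false, List.foldl_nil]
      rw [apply_shift (rangesOf button rest) ep.2.length
            (List.replicate ep.2.length false) (List.replicate (totalLen rest) false)
            (List.length_replicate ..), ih, hsegc false hbeq]

-- B's per-button list equals A's boolean sequence
theorem alt_inner_eq (button : String) (td : List (String × List (String × List Int))) :
    ((buildPositions td).2.getD button []).foldl (fun vis r => setTrueRange vis r.1 r.2)
      (List.replicate (buildPositions td).1 false)
    = segBools button td := by
  unfold buildPositions
  rw [build_getD td 0 PySem.Dict.empty button, build_fst td 0 PySem.Dict.empty]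
  simp only [PySem.Dict.getD_empty, List.nil_append, Nat.zero_add]
  have : (rangesOf button td).map (fun p => (p.1 + 0, p.2 + 0)) = rangesOf button td := by
    simp
  rw [this]
  exact apply_ranges_eq_segBools button td

-- a fold of inserts starting from a dict with non-empty items keeps items non-empty
theorem foldl_insert_items_ne_nil (bs : List String)
    (f : String → List Bool) (d : PySem.Dict String (List Bool)) (h : d.items ≠ []) :
    ((bs.foldl (fun d b => d.insert b (f b)) d).items) ≠ [] := by
  induction bs generalizing d with
  | nil => exact h
  | cons b rest ih =>
    rw [List.foldl_cons]
    apply ih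
    rw [PySem.Dict.items_insert]
    split
    · intro hc
      exact h (List.map_eq_nil_iff.mp hc)
    · simp

-- with an empty traces_dict, A's button loop never touches the dict
theorem foldA_nil_id (buttons : List String) (g : PySem.Dict String (List Bool)) :
    buttons.foldl (fun (g : PySem.Dict String (List Bool)) button =>
      (([] : List (String × List (String × List Int))).foldl (stepA button) ([], g)).2) g = g := by
  induction buttons generalizing g with
  | nil => rfl
  | cons b bs ih =>
    have h1 : (List.foldl (stepA b) (([] : List Bool), g) []).2 = g := rfl
    rw [List.foldl_cons, h1]
    exact ih g

theorem create_visibility_buttons_booleans_eq_of_td_ne_nil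
    (buttons : List String) (traces_dict : List (String × List (String × List Int)))
    (h : traces_dict ≠ []) :
    create_visibility_buttons_booleans buttons traces_dict
    = create_visibility_buttons_booleans_alt buttons traces_dict := by
  unfold create_visibility_buttons_booleans create_visibility_buttons_booleans_alt
  have hfun : (fun (g : PySem.Dict String (List Bool)) button =>
      (traces_dict.foldl (stepA button) ([], g)).2)
      = (fun (d : PySem.Dict String (List Bool)) button =>
          d.insert button
            (((buildPositions traces_dict).2.getD button []).foldl
              (fun vis r => setTrueRange vis r.1 r.2)
              (List.replicate (buildPositions traces_dict).1 false))) := by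
    funext g button
    rw [innerA_snd button traces_dict [] g h, alt_inner_eq]
    simp
  rw [hfun]

-- ===== VERDICT (by name: the statement is the Claim_ definition above) =====
theorem create_visibility_buttons_booleans_spec : Claim_unchanged_create_visibility_buttons_booleans := by
  intro buttons traces_dict hdom hnd
  by_cases htd : traces_dict = []
  · by_cases hbe : buttons = []
    · subst htd hbe; rfl
    · exact absurd ⟨hbe, htd⟩ hnd
  · exact create_visibility_buttons_booleans_eq_of_td_ne_nil buttons traces_dict htd

theorem create_visibility_buttons_booleans_changed : Claim_changed_create_visibility_buttons_booleans := by
  unfold Claim_changed_create_visibility_buttons_booleans; decide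

theorem create_visibility_buttons_booleans_tight : Claim_exact_create_visibility_buttons_booleans := by
  intro buttons traces_dict hdom hd
  obtain ⟨hb, htd⟩ := hd
  subst htd
  clear hdom
  have hA : create_visibility_buttons_booleans buttons [] = [] := by
    unfold create_visibility_buttons_booleans
    rw [foldA_nil_id buttons PySem.Dict.empty]
    rfl
  have hB : create_visibility_buttons_booleans_alt buttons [] ≠ [] := by
    unfold create_visibility_buttons_booleans_alt
    cases buttons with
    | nil => exact absurd rfl hb
    | cons b bs =>
      simp only [List.foldl_cons]
      exact foldl_insert_items_ne_nil bs _ _ (by simp [PySem.Dict.items_insert, PySem.Dict.empty])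
  rw [hA]
  exact fun he => hB he.symm
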